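-- pv_equiv track=rewrite | github.com/okigan/adventofcode | 2022/day17/a.py | move_rocks_right
-- ===== SOURCE A (Python) =====
-- def move_rocks_right(cave:dict):
--     rows = len(cave.items()) // 7
--
--     moved = False
--     for r in range(rows - 1, -1, -1):
--         for c in range(7-1, 0, -1):
--             if cave[(c, r)] == ".":
--                 cave[(c, r)] = cave[(c - 1, r)]
--                 if cave[(c, r)] == "@":
--                     moved = True
--                 cave[(c-1, r)] = "."
--     return moved
-- ===== SOURCE B (Python) =====
-- def move_rocks_right(cave: dict):
--     rows = len(cave.items()) // 7
--     # snapshot the grid once, then relocate whole runs instead of cell-wise bubbling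
--     grid = [[cave[(c, r)] for c in range(7)] for r in range(rows)]
--     moved = False
--     for r in range(rows):
--         row = grid[r]
--         start = None  # left end of the current run of non-'.' cells, if any
--         for c in range(7):
--             if row[c] != ".":
--                 if start is None:
--                     start = c
--             else:
--                 if start is not None:
--                     # run [start, c-1] is followed by a gap at c: it shifts right by one
--                     if "@" in row[start:c]:
--                         moved = True
--                     cave[(start, r)] = "."
--                     for k in range(start, c):
--                         cave[(k + 1, r)] = row[k]
--                     start = None
--         # a run still open at the wall (column 6) does not move
--     return moved
-- ===== Notes on version B (the rewrite author's own statement) =====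
-- stated objective: alternative
-- what changed: A bubbles each rock cell-wise right-to-left (for every '.' cell, swap in the left neighbour); B snapshots the grid once, scans each row left-to-right detecting maximal runs of non-'.' cells, and relocates each run that is followed by a gap one column right in a single block move, flagging moved when such a run contains '@'.
import Mathlib
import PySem

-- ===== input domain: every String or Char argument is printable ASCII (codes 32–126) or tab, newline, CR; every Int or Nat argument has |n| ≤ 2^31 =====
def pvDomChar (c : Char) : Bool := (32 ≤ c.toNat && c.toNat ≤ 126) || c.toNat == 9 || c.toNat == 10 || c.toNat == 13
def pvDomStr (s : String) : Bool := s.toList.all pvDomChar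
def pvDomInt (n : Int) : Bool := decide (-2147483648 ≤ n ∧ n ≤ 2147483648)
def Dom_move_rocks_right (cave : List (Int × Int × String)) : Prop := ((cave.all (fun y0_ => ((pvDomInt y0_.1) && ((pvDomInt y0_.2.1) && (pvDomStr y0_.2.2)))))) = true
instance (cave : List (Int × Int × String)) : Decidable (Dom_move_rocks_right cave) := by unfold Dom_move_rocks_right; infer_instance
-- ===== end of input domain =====

-- B replaces A's cell-wise right-to-left bubble pass with a snapshot + run-relocation pass
-- (objective: alternative decomposition). A mutates its dict argument; the equivalence proved
-- here is about the RETURN value (B performs the same mutation in Python).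

-- ===== PORT A =====
-- the Python dict {(c, r): s} as a PySem.Dict keyed by the (c, r) pair
def pvDict (cave : List (Int × Int × String)) : PySem.Dict (Int × Int) String :=
  PySem.Dict.ofList (cave.map (fun y => ((y.1, y.2.1), y.2.2)))

-- body of A's inner loop over c (one bubble step), and A's whole pass over one row r
def pvAIn (r : Int) (st : PySem.Dict (Int × Int) String × Bool) (c : Int) :
    PySem.Dict (Int × Int) String × Bool :=
  if st.1.getD (c, r) "" = "." then
    let d := st.1.insert (c, r) (st.1.getD (c - 1, r) "")
    let moved := if d.getD (c, r) "" = "@" then true else st.2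
    (d.insert (c - 1, r) ".", moved)
  else st

def pvARow (st : PySem.Dict (Int × Int) String × Bool) (r : Int) :
    PySem.Dict (Int × Int) String × Bool :=
  (PySem.List.pyRange (7 - 1) 0 (-1)).foldl (pvAIn r) st

def move_rocks_right (cave : List (Int × Int × String)) : Bool :=
  let d0 := pvDict cave
  let rows : Int := PySem.Int.floordiv (d0.size : Int) 7
  ((PySem.List.pyRange (rows - 1) (-1) (-1)).foldl pvARow (d0, false)).2

-- ===== PORT B =====
-- body of B's scan over c within one row (run detection + relocation), and B's pass over row r
def pvBIn (row : List String) (r : Int)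
    (q : PySem.Dict (Int × Int) String × Bool × Option Int) (c : Int) :
    PySem.Dict (Int × Int) String × Bool × Option Int :=
  if ¬ (PySem.List.pyGetD row c "" = ".") then
    (if q.2.2 = none then (q.1, q.2.1, some c) else q)
  else
    match q.2.2 with
    | some start =>
      let moved := if (PySem.List.slice row (some start) (some c)).contains "@" then true else q.2.1
      let d := q.1.insert (start, r) "."
      let d := (PySem.List.pyRange start c 1).foldl
        (fun d k => d.insert (k + 1, r) (PySem.List.pyGetD row k "")) d
      (d, moved, none)
    | none => q

def pvBRow (grid : List (List String)) (st : PySem.Dict (Int × Int) String × Bool) (r : Int) :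
    PySem.Dict (Int × Int) String × Bool :=
  let row := PySem.List.pyGetD grid r []
  let q := (PySem.List.pyRange 0 7 1).foldl (pvBIn row r) (st.1, st.2, none)
  (q.1, q.2.1)

def move_rocks_right_alt (cave : List (Int × Int × String)) : Bool :=
  let d0 := pvDict cave
  let rows : Int := PySem.Int.floordiv (d0.size : Int) 7
  let grid := (PySem.List.pyRange 0 rows 1).map
    (fun r => (PySem.List.pyRange 0 7 1).map (fun c => d0.getD (c, r) ""))
  ((PySem.List.pyRange 0 rows 1).foldl (pvBRow grid) (d0, false)).2

-- ===== PRECONDITION & SPEC =====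
-- Pre_ excludes exactly the inputs on which the Python A raises KeyError: some key (c, r),
-- 0 ≤ c < 7, 0 ≤ r < len(cave)//7, is absent from the dict.
def Pre_move_rocks_right (cave : List (Int × Int × String)) : Prop :=
  ((PySem.List.pyRange 0 (PySem.Int.floordiv ((pvDict cave).size : Int) 7) 1).all fun r =>
    (PySem.List.pyRange 0 7 1).all fun c => (pvDict cave).contains (c, r)) = true
instance (cave : List (Int × Int × String)) : Decidable (Pre_move_rocks_right cave) := by unfold Pre_move_rocks_right; infer_instance

def pvWitness_move_rocks_right : (List (Int × Int × String)) :=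
  [(0, 0, "."), (1, 0, "@"), (2, 0, "."), (3, 0, "#"), (4, 0, "#"), (5, 0, "."), (6, 0, ".")]

def Spec_move_rocks_right (cave : List (Int × Int × String)) (out : Bool) : Prop := out = move_rocks_right_alt cave
instance (cave : List (Int × Int × String)) (out : Bool) : Decidable (Spec_move_rocks_right cave out) := by unfold Spec_move_rocks_right; infer_instance

-- ===== CLAIM (what is proved, stated in full; the proofs are below) =====
def Claim_equal_move_rocks_right : Prop := ∀ (cave : List (Int × Int × String)), Dom_move_rocks_right cave → Pre_move_rocks_right cave → Spec_move_rocks_right cave (move_rocks_right cave)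

-- ===== LEMMAS AND PROOFS =====

-- token abstraction: only "is it '.'" and "is it '@'" matter for the moved flag
def pvTok (s : String) : Fin 3 := if s = "." then 0 else if s = "@" then 1 else 2

theorem pvTok_eq_zero (s : String) : (pvTok s = 0) = (s = ".") := by
  unfold pvTok; split_ifs with h1 h2 <;> simp_all
theorem pvTok_eq_one (s : String) : (pvTok s = 1) = (s = "@") := by
  unfold pvTok; split_ifs with h1 h2 <;> simp_all

-- A's inner row pass on tokens (t0..t6 = tokens of the row's 7 cells), with accumulator m
def pvAStep (st : List (Fin 3) × Bool) (c : Nat) : List (Fin 3) × Bool :=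
  if st.1.getD c 2 = 0 then
    let x := st.1.getD (c - 1) 2
    (((st.1.set c x).set (c - 1) 0), (if x = 1 then true else st.2))
  else st
def pvA (t0 t1 t2 t3 t4 t5 t6 : Fin 3) (m : Bool) : Bool :=
  ([6,5,4,3,2,1].foldl pvAStep ([t0,t1,t2,t3,t4,t5,t6], m)).2

-- B's inner row pass on tokens
def pvBStep (w : List (Fin 3)) (q : Bool × Option Nat) (c : Nat) : Bool × Option Nat :=
  if ¬ (w.getD c 2 = 0) then (if q.2 = none then (q.1, some c) else q)
  else
    match q.2 with
    | some s => ((if ((w.drop s).take (c - s)).contains 1 then true else q.1), none)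
    | none => q
def pvB (t0 t1 t2 t3 t4 t5 t6 : Fin 3) (m : Bool) : Bool :=
  ([0,1,2,3,4,5,6].foldl (pvBStep [t0,t1,t2,t3,t4,t5,t6]) (m, none)).1

set_option maxHeartbeats 4000000 in
theorem pvA_or : ∀ (t0 t1 t2 t3 t4 t5 t6 : Fin 3) (m : Bool),
    pvA t0 t1 t2 t3 t4 t5 t6 m = (m || pvA t0 t1 t2 t3 t4 t5 t6 false) := by decide

set_option maxHeartbeats 4000000 in
theorem pvB_or : ∀ (t0 t1 t2 t3 t4 t5 t6 : Fin 3) (m : Bool),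
    pvB t0 t1 t2 t3 t4 t5 t6 m = (m || pvB t0 t1 t2 t3 t4 t5 t6 false) := by decide

set_option maxHeartbeats 4000000 in
theorem pvAB : ∀ (t0 t1 t2 t3 t4 t5 t6 : Fin 3),
    pvA t0 t1 t2 t3 t4 t5 t6 false = pvB t0 t1 t2 t3 t4 t5 t6 false := by decide


-- row tokens of dict d at row r
def pvRowTok (d : PySem.Dict (Int × Int) String) (r : Int) (c : Int) : Fin 3 :=
  pvTok (d.getD (c, r) "")

-- simulation relation for A's inner loop: w mirrors the 7 cells of row r as tokens
def pvRelA (r : Int) (d : PySem.Dict (Int × Int) String) (w : List (Fin 3)) : Prop :=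
  w.length = 7 ∧ ∀ c : Nat, c < 7 → pvTok (d.getD ((c : Int), r) "") = w.getD c 2

theorem pvTok_empty : pvTok "" = 2 := by decide

theorem pvGetD_map_tok (row : List String) (n : Nat) :
    (row.map pvTok).getD n 2 = pvTok (row.getD n "") := by
  induction row generalizing n with
  | nil => simp [pvTok_empty]
  | cons x xs ih => cases n with
    | zero => simp
    | succ k => simpa using ih k

theorem pvContains_map_tok (xs : List String) :
    (xs.map pvTok).contains 1 = xs.contains "@" := by
  induction xs with
  | nil => simp
  | cons x xs ih =>
      simp only [List.map_cons, List.contains_cons, ih]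
      have : (1 == pvTok x) = ("@" == x) := by
        have h := pvTok_eq_one x
        by_cases hx : x = "@" <;> simp_all [eq_comm]
      rw [this]

-- one step of A's inner loop matches one token step
theorem pvAIn_sim (r : Int) (d : PySem.Dict (Int × Int) String) (w : List (Fin 3)) (m : Bool)
    (cn : Nat) (h1 : 1 ≤ cn) (h7 : cn < 7) (hR : pvRelA r d w) :
    pvRelA r (pvAIn r (d, m) (cn : Int)).1 (pvAStep (w, m) cn).1 ∧
      (pvAIn r (d, m) (cn : Int)).2 = (pvAStep (w, m) cn).2 := by
  obtain ⟨hlen, hR⟩ := hR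
  have hcast : ((cn - 1 : Nat) : Int) = (cn : Int) - 1 := by omega
  have hcond : (d.getD ((cn : Int), r) "" = ".") ↔ (w.getD cn 2 = 0) := by
    rw [← hR cn h7, pvTok_eq_zero]
  have hprev : pvTok (d.getD ((cn : Int) - 1, r) "") = w.getD (cn - 1) 2 := by
    rw [← hcast]; exact hR (cn - 1) (by omega)
  by_cases hd : d.getD ((cn : Int), r) "" = "."
  · have hw : w.getD cn 2 = 0 := hcond.mp hd
    have eA : pvAIn r (d, m) ((cn : Nat) : Int)
        = ((d.insert ((cn : Int), r) (d.getD ((cn : Int) - 1, r) "")).insert ((cn : Int) - 1, r) ".",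
           if (d.insert ((cn : Int), r) (d.getD ((cn : Int) - 1, r) "")).getD ((cn : Int), r) "" = "@"
           then true else m) := by
      simp [pvAIn, hd]
    have eB : pvAStep (w, m) cn
        = ((w.set cn (w.getD (cn - 1) 2)).set (cn - 1) 0,
           if w.getD (cn - 1) 2 = 1 then true else m) := by
      unfold pvAStep; rw [if_pos hw]
    rw [eA, eB]
    constructor
    · refine ⟨by simp [hlen], ?_⟩
      intro c hc
      by_cases hc1 : c = cn - 1
      · subst hc1
        have hd2 : ((d.insert ((cn : Int), r) (d.getD ((cn : Int) - 1, r) "")).insert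
            ((cn : Int) - 1, r) ".").getD (((cn - 1 : Nat) : Int), r) "" = "." := by
          rw [hcast]; simp
        have hw2 : ((w.set cn (w.getD (cn - 1) 2)).set (cn - 1) 0).getD (cn - 1) 2 = 0 := by
          rw [List.getD_eq_getElem?_getD, List.getElem?_set_self (by rw [List.length_set, hlen]; omega)]
          rfl
        rw [hd2, hw2]; rfl
      · by_cases hc2 : c = cn
        · subst hc2
          have hd2 : ((d.insert ((c : Int), r) (d.getD ((c : Int) - 1, r) "")).insert
              ((c : Int) - 1, r) ".").getD ((c : Int), r) "" = d.getD ((c : Int) - 1, r) "" := by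
            have hne : ((c : Int), r) ≠ ((c : Int) - 1, r) := by
              simp only [ne_eq, Prod.mk.injEq]; omega
            simp [PySem.Dict.getD_insert, hne]
          have hw2 : ((w.set c (w.getD (c - 1) 2)).set (c - 1) 0).getD c 2 = w.getD (c - 1) 2 := by
            rw [List.getD_eq_getElem?_getD, List.getElem?_set_ne (by omega),
              List.getElem?_set_self (by rw [hlen]; omega)]
            rfl
          rw [hd2, hw2]; exact hprev
        · have hne1 : ((c : Int), r) ≠ ((cn : Int) - 1, r) := by
            simp only [ne_eq, Prod.mk.injEq]; omega
          have hne2 : ((c : Int), r) ≠ ((cn : Int), r) := by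
            simp only [ne_eq, Prod.mk.injEq]; omega
          have hd2 : ((d.insert ((cn : Int), r) (d.getD ((cn : Int) - 1, r) "")).insert
              ((cn : Int) - 1, r) ".").getD ((c : Int), r) "" = d.getD ((c : Int), r) "" := by
            simp [PySem.Dict.getD_insert, hne1, hne2]
          have hw2 : ((w.set cn (w.getD (cn - 1) 2)).set (cn - 1) 0).getD c 2 = w.getD c 2 := by
            rw [List.getD_eq_getElem?_getD, List.getElem?_set_ne (by omega),
              List.getElem?_set_ne (by omega), ← List.getD_eq_getElem?_getD]
          rw [hd2, hw2]; exact hR c hc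
    · have hself : ((d.insert ((cn : Int), r) (d.getD ((cn : Int) - 1, r) "")).getD ((cn : Int), r) "")
          = d.getD ((cn : Int) - 1, r) "" := by
        simp
      rw [hself]
      have heq : (d.getD ((cn : Int) - 1, r) "" = "@") ↔ (w.getD (cn - 1) 2 = 1) := by
        rw [← hprev, pvTok_eq_one]
      by_cases hAt : d.getD ((cn : Int) - 1, r) "" = "@"
      · rw [if_pos hAt, if_pos (heq.mp hAt)]
      · rw [if_neg hAt, if_neg (fun h => hAt (heq.mpr h))]
  · have hw : ¬ (w.getD cn 2 = 0) := fun h => hd (hcond.mpr h)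
    have eA : pvAIn r (d, m) ((cn : Nat) : Int) = (d, m) := by simp [pvAIn, hd]
    have eB : pvAStep (w, m) cn = (w, m) := by unfold pvAStep; rw [if_neg hw]
    rw [eA, eB]
    exact ⟨⟨hlen, hR⟩, rfl⟩

-- the whole inner loop of A matches the token fold
theorem pvFoldA_sim (r : Int) (l : List Nat) (hl : ∀ c ∈ l, 1 ≤ c ∧ c < 7) :
    ∀ (d : PySem.Dict (Int × Int) String) (w : List (Fin 3)) (m : Bool), pvRelA r d w →
      pvRelA r (((l.map Int.ofNat).foldl (pvAIn r) (d, m)).1) ((l.foldl pvAStep (w, m)).1) ∧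
        ((l.map Int.ofNat).foldl (pvAIn r) (d, m)).2 = (l.foldl pvAStep (w, m)).2 := by
  induction l with
  | nil => intro d w m hR; exact ⟨hR, rfl⟩
  | cons c cs ih =>
      intro d w m hR
      have hc := hl c List.mem_cons_self
      have hcs : ∀ x ∈ cs, 1 ≤ x ∧ x < 7 := fun x hx => hl x (List.mem_cons_of_mem c hx)
      obtain ⟨hR', hm'⟩ := pvAIn_sim r d w m c hc.1 hc.2 hR
      have e1 : pvAIn r (d, m) ((c : Nat) : Int)
          = ((pvAIn r (d, m) (c : Int)).1, (pvAStep (w, m) c).2) := by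
        rw [← hm']
      have e2 : pvAStep (w, m) c = ((pvAStep (w, m) c).1, (pvAStep (w, m) c).2) := rfl
      rw [List.map_cons, List.foldl_cons, List.foldl_cons, Int.ofNat_eq_natCast, e1, e2]
      exact ih hcs _ _ _ hR'

-- A's pass over row r: the moved flag is pvA on the row's tokens
theorem pvARow_snd (d : PySem.Dict (Int × Int) String) (m : Bool) (r : Int) :
    (pvARow (d, m) r).2 =
      pvA (pvRowTok d r 0) (pvRowTok d r 1) (pvRowTok d r 2) (pvRowTok d r 3)
        (pvRowTok d r 4) (pvRowTok d r 5) (pvRowTok d r 6) m := by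
  have hr7 : PySem.List.pyRange (7 - 1) 0 (-1)
      = ([6, 5, 4, 3, 2, 1] : List Nat).map Int.ofNat := by decide
  have hR : pvRelA r d [pvRowTok d r 0, pvRowTok d r 1, pvRowTok d r 2, pvRowTok d r 3,
      pvRowTok d r 4, pvRowTok d r 5, pvRowTok d r 6] := by
    refine ⟨rfl, ?_⟩
    intro c hc
    interval_cases c <;> rfl
  have := (pvFoldA_sim r [6, 5, 4, 3, 2, 1] (by decide) d _ m hR).2
  rw [pvARow, hr7, this]
  rfl

-- A's pass over row r does not change cells of other rows
theorem pvFoldA_other (r c' r' : Int) (hr : r' ≠ r) (l : List Int) :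
    ∀ (d : PySem.Dict (Int × Int) String) (m : Bool),
      ((l.foldl (pvAIn r) (d, m)).1).getD (c', r') "" = d.getD (c', r') "" := by
  induction l with
  | nil => intro d m; rfl
  | cons c cs ih =>
      intro d m
      simp only [List.foldl_cons]
      by_cases hd : d.getD ((c : Int), r) "" = "."
      · have e : pvAIn r (d, m) c
            = ((d.insert (c, r) (d.getD (c - 1, r) "")).insert (c - 1, r) ".",
               if (d.insert (c, r) (d.getD (c - 1, r) "")).getD (c, r) "" = "@" then true else m) := by
          simp [pvAIn, hd]
        rw [e, ih]
        simp [PySem.Dict.getD_insert, Prod.mk.injEq, hr]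
      · have e : pvAIn r (d, m) c = (d, m) := by simp [pvAIn, hd]
        rw [e, ih]

-- simulation relation for B's inner loop: the (moved, start) part mirrors the token scan
def pvRelB (q : PySem.Dict (Int × Int) String × Bool × Option Int) (p : Bool × Option Nat) : Prop :=
  q.2.1 = p.1 ∧ q.2.2 = p.2.map (fun n : Nat => (n : Int))

theorem pvBIn_sim (row : List String) (r : Int)
    (q : PySem.Dict (Int × Int) String × Bool × Option Int) (p : Bool × Option Nat)
    (cn : Nat) (hq : pvRelB q p) :
    pvRelB (pvBIn row r q (cn : Int)) (pvBStep (row.map pvTok) p cn) := by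
  obtain ⟨qd, qm, qs⟩ := q
  obtain ⟨pm, ps⟩ := p
  obtain ⟨h1, h2⟩ := hq
  simp only at h1 h2
  subst h1
  have hcond : (PySem.List.pyGetD row (cn : Int) "" = ".") ↔ ((row.map pvTok).getD cn 2 = 0) := by
    rw [pvGetD_map_tok, pvTok_eq_zero, PySem.List.pyGetD_natCast]
  by_cases hd : PySem.List.pyGetD row (cn : Int) "" = "."
  · have hw : (row.map pvTok).getD cn 2 = 0 := hcond.mp hd
    cases ps with
    | none =>
        have h2' : qs = none := by simpa using h2
        have eA : pvBIn row r (qd, qm, qs) (cn : Int) = (qd, qm, qs) := by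
          simp [pvBIn, hd, h2']
        have eB : pvBStep (row.map pvTok) (qm, none) cn = (qm, none) := by
          unfold pvBStep; rw [if_neg (not_not_intro hw)]
        rw [eA, eB]
        exact ⟨rfl, by simp [h2']⟩
    | some s =>
        have h2' : qs = some ((s : Nat) : Int) := by simpa using h2
        have eA : pvBIn row r (qd, qm, qs) (cn : Int)
            = ((PySem.List.pyRange ((s : Nat) : Int) (cn : Int) 1).foldl
                  (fun d k => d.insert (k + 1, r) (PySem.List.pyGetD row k "")) (qd.insert (((s : Nat) : Int), r) "."),
               (if (PySem.List.slice row (some ((s : Nat) : Int)) (some (cn : Int))).contains "@" then true else qm),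
               none) := by
          simp [pvBIn, hd, h2']
        have eB : pvBStep (row.map pvTok) (qm, some s) cn
            = ((if (((row.map pvTok).drop s).take (cn - s)).contains 1 then true else qm), none) := by
          unfold pvBStep; rw [if_neg (not_not_intro hw)]
        rw [eA, eB]
        refine ⟨?_, rfl⟩
        have hsl : PySem.List.slice row (some ((s : Nat) : Int)) (some ((cn : Nat) : Int))
            = (row.drop s).take (cn - s) := PySem.List.slice_natCast row s cn
        have hmt : (((row.map pvTok).drop s).take (cn - s)).contains 1
            = ((row.drop s).take (cn - s)).contains "@" := by
          rw [← List.map_drop, ← List.map_take, pvContains_map_tok]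
        simp only [hsl, hmt]
  · have hw : ¬ ((row.map pvTok).getD cn 2 = 0) := fun h => hd (hcond.mpr h)
    have hd' : ¬ row[cn]?.getD "" = "." := by simpa using hd
    cases ps with
    | none =>
        have h2' : qs = none := by simpa using h2
        have eA : pvBIn row r (qd, qm, qs) (cn : Int) = (qd, qm, some (cn : Int)) := by
          simp [pvBIn, hd', h2']
        have eB : pvBStep (row.map pvTok) (qm, none) cn = (qm, some cn) := by
          unfold pvBStep
          rw [if_pos hw, if_pos rfl]
        rw [eA, eB]
        exact ⟨rfl, by simp⟩
    | some s =>
        have h2' : qs = some ((s : Nat) : Int) := by simpa using h2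
        have eA : pvBIn row r (qd, qm, qs) (cn : Int) = (qd, qm, qs) := by
          simp [pvBIn, hd', h2']
        have eB : pvBStep (row.map pvTok) (qm, some s) cn = (qm, some s) := by
          unfold pvBStep
          rw [if_pos hw, if_neg (by simp : ¬ ((qm, some s).2 = (none : Option Nat)))]
        rw [eA, eB]
        exact ⟨rfl, by simp [h2']⟩

theorem pvFoldB_sim (row : List String) (r : Int) (l : List Nat) :
    ∀ (q : PySem.Dict (Int × Int) String × Bool × Option Int) (p : Bool × Option Nat),
      pvRelB q p →
      pvRelB ((l.map Int.ofNat).foldl (pvBIn row r) q)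
        (l.foldl (pvBStep (row.map pvTok)) p) := by
  induction l with
  | nil => intro q p h; exact h
  | cons c cs ih =>
      intro q p h
      rw [List.map_cons, List.foldl_cons, List.foldl_cons, Int.ofNat_eq_natCast]
      exact ih _ _ (pvBIn_sim row r q p c h)

-- B's pass over row r: the moved flag is pvB on the snapshot row's tokens
theorem pvBRow_snd (grid : List (List String)) (d : PySem.Dict (Int × Int) String)
    (m : Bool) (r : Int) (u0 u1 u2 u3 u4 u5 u6 : String)
    (hrow : PySem.List.pyGetD grid r [] = [u0, u1, u2, u3, u4, u5, u6]) :
    (pvBRow grid (d, m) r).2 =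
      pvB (pvTok u0) (pvTok u1) (pvTok u2) (pvTok u3) (pvTok u4) (pvTok u5) (pvTok u6) m := by
  have hr7 : PySem.List.pyRange 0 7 1 = ([0, 1, 2, 3, 4, 5, 6] : List Nat).map Int.ofNat := by
    decide
  have h := pvFoldB_sim (PySem.List.pyGetD grid r []) r [0, 1, 2, 3, 4, 5, 6]
    (d, m, none) (m, none) ⟨rfl, rfl⟩
  rw [pvBRow]
  simp only [hr7]
  rw [h.1, hrow]
  rfl

-- per-row moved flags computed from the starting dict
def pvFA (d0 : PySem.Dict (Int × Int) String) (k : Nat) : Bool :=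
  pvA (pvRowTok d0 (k : Int) 0) (pvRowTok d0 (k : Int) 1) (pvRowTok d0 (k : Int) 2)
    (pvRowTok d0 (k : Int) 3) (pvRowTok d0 (k : Int) 4) (pvRowTok d0 (k : Int) 5)
    (pvRowTok d0 (k : Int) 6) false
def pvGB (d0 : PySem.Dict (Int × Int) String) (k : Nat) : Bool :=
  pvB (pvRowTok d0 (k : Int) 0) (pvRowTok d0 (k : Int) 1) (pvRowTok d0 (k : Int) 2)
    (pvRowTok d0 (k : Int) 3) (pvRowTok d0 (k : Int) 4) (pvRowTok d0 (k : Int) 5)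
    (pvRowTok d0 (k : Int) 6) false

-- A's outer loop (rows-1 down to 0): moved is the OR of the per-row flags on d0
theorem pvOuterA (d0 : PySem.Dict (Int × Int) String) :
    ∀ (n : Nat) (d : PySem.Dict (Int × Int) String) (m : Bool),
      (∀ (c : Int) (k : Nat), k < n → d.getD (c, (k : Int)) "" = d0.getD (c, (k : Int)) "") →
      ((PySem.List.pyRange ((n : Int) - 1) (-1) (-1)).foldl pvARow (d, m)).2
        = (m || (List.range n).any (fun k => pvFA d0 k)) := by
  intro n
  induction n with
  | zero =>
      intro d m _
      rw [PySem.List.pyRange_neg_one_eq_nil (by omega)]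
      simp
  | succ n ih =>
      intro d m hagree
      have e : ((n + 1 : Nat) : Int) - 1 = (n : Int) := by push_cast; ring
      rw [e, PySem.List.pyRange_neg_one_cons (by omega), List.foldl_cons]
      have htok : ∀ c : Int, pvRowTok d (n : Int) c = pvRowTok d0 (n : Int) c := by
        intro c; unfold pvRowTok; rw [hagree c n (by omega)]
      have hsnd : (pvARow (d, m) (n : Int)).2 = (m || pvFA d0 n) := by
        rw [pvARow_snd, htok 0, htok 1, htok 2, htok 3, htok 4, htok 5, htok 6]
        exact pvA_or _ _ _ _ _ _ _ m
      have hother : ∀ (c : Int) (k : Nat), k < n →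
          ((pvARow (d, m) (n : Int)).1).getD (c, (k : Int)) "" = d0.getD (c, (k : Int)) "" := by
        intro c k hk
        have hne : ((k : Int)) ≠ ((n : Int)) := by exact_mod_cast Nat.ne_of_lt hk
        rw [pvARow, pvFoldA_other (n : Int) c (k : Int) hne _ d m]
        exact hagree c k (by omega)
      have epair : pvARow (d, m) (n : Int) = ((pvARow (d, m) (n : Int)).1, m || pvFA d0 n) := by
        rw [← hsnd]
      rw [epair, ih _ _ hother, List.range_succ]
      simp only [List.any_append, List.any_cons, List.any_nil]
      cases m <;> cases pvFA d0 n <;> simp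

-- B's outer loop (0 up to rows-1): moved is the OR of the per-row flags on d0
theorem pvOuterB (d0 : PySem.Dict (Int × Int) String) (rows : Int)
    (grid : List (List String))
    (hgrid : grid = (PySem.List.pyRange 0 rows 1).map
      (fun r => (PySem.List.pyRange 0 7 1).map (fun c => d0.getD (c, r) ""))) :
    ∀ (n : Nat), (n : Int) ≤ rows →
      ((PySem.List.pyRange 0 (n : Int) 1).foldl (pvBRow grid) (d0, false)).2
        = (List.range n).any (fun k => pvGB d0 k) := by
  intro n
  induction n with
  | zero =>
      intro _
      rw [show ((0 : Nat) : Int) = 0 from rfl, PySem.List.pyRange_zero]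
      simp
  | succ n ih =>
      intro hn
      have hn' : (n : Int) ≤ rows := by push_cast at hn ⊢; omega
      have e : ((n + 1 : Nat) : Int) = (n : Int) + 1 := by push_cast; ring
      rw [e, PySem.List.pyRange_one_succ_right (by omega), List.foldl_append]
      have hrow : PySem.List.pyGetD grid (n : Int) []
          = [d0.getD (0, (n : Int)) "", d0.getD (1, (n : Int)) "", d0.getD (2, (n : Int)) "",
             d0.getD (3, (n : Int)) "", d0.getD (4, (n : Int)) "", d0.getD (5, (n : Int)) "",
             d0.getD (6, (n : Int)) ""] := by
        rw [hgrid, PySem.List.pyGetD_map_pyRange_of_nonneg _ rows (n : Int) [] (by omega)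
          (by push_cast at hn ⊢; omega)]
        rw [show PySem.List.pyRange 0 7 1 = [0, 1, 2, 3, 4, 5, 6] from by decide]
        rfl
      set P := (PySem.List.pyRange 0 (n : Int) 1).foldl (pvBRow grid) (d0, false) with hP
      have hsnd : (pvBRow grid P (n : Int)).2
          = (P.2 || pvGB d0 n) := by
        have := pvBRow_snd grid P.1 P.2 (n : Int) _ _ _ _ _ _ _ hrow
        rw [show P = (P.1, P.2) from rfl] at *
        rw [this]
        exact pvB_or _ _ _ _ _ _ _ P.2
      rw [List.foldl_cons, List.foldl_nil, hsnd, ih hn', List.range_succ]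
      simp only [List.any_append, List.any_cons, List.any_nil]
      cases pvGB d0 n <;> simp

-- ===== VERDICT (by name: the statement is the Claim_ definition above) =====
theorem move_rocks_right_spec : Claim_equal_move_rocks_right := by
  intro cave _hdom _hpre
  unfold Spec_move_rocks_right move_rocks_right move_rocks_right_alt
  dsimp only
  have h0 : 0 ≤ PySem.Int.floordiv ((pvDict cave).size : Int) 7 := by
    have := Int.fdiv_nonneg (a := ((pvDict cave).size : Int)) (b := 7) (by positivity) (by omega)
    simpa [PySem.Int.floordiv] using this
  set rows : Int := PySem.Int.floordiv ((pvDict cave).size : Int) 7 with hrows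
  have hrn : rows = (rows.toNat : Int) := (Int.toNat_of_nonneg h0).symm
  rw [hrn]
  rw [pvOuterA (pvDict cave) rows.toNat (pvDict cave) false (fun _ _ _ => rfl),
    pvOuterB (pvDict cave) ((rows.toNat : Nat) : Int) _ rfl rows.toNat (le_refl _)]
  have hFG : (fun k => pvFA (pvDict cave) k) = (fun k => pvGB (pvDict cave) k) := by
    funext k
    exact pvAB _ _ _ _ _ _ _
  rw [hFG, Bool.false_or]
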